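-- pv_equiv track=rewrite | github.com/godls7/Practice-Algorithm | programmers/완전탐색/모의고사.py | solution
-- ===== SOURCE A (Python) =====
-- def solution(answers):
--
--     answer1 = [1, 2, 3, 4, 5] # 1번 답 패턴 - 5개
--     answer2 = [2, 1, 2, 3, 2, 4, 2, 5] # 2번 답 패턴 - 8개
--     answer3 = [3, 3, 1, 1, 2, 2, 4, 4, 5, 5] # 3번 답 패턴 - 10개
--
--     score = [0,0,0]
--
--     for i in range(len(answers)):
--         if answers[i] == answer1[i%5]: # 정답과 1번 답 비교
--             score[0] += 1
--
--         if answers[i] == answer2[i%8]: # 정답과 2번 답 비교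
--             score[1] += 1
--
--         if answers[i] == answer3[i%10]: # 정답과 3번 답 비교
--             score[2] += 1
--
--     winner = []
--     for i in range(3):
--         if score[i] == max(score): # 가장 높은 점수 맞은 사람 출력
--             winner.append(1+i)
--
--     return winner
-- ===== SOURCE B (Python) =====
-- def solution(answers):
--     patterns = ([1, 2, 3, 4, 5],
--                 [2, 1, 2, 3, 2, 4, 2, 5],
--                 [3, 3, 1, 1, 2, 2, 4, 4, 5, 5])
--     scores = []
--     for pat in patterns:
--         L = len(pat)
--         scores.append(sum(answers[j::L].count(pat[j]) for j in range(L)))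
--     best = max(scores)
--     return [k for k in (1, 2, 3) if scores[k - 1] == best]
-- ===== Notes on version B (the rewrite author's own statement) =====
-- stated objective: idiomatic
-- what changed: A makes one combined pass over the answers, cycling all three patterns with i%L and mutating a 3-cell score list; B never cycles a pattern: for each pattern it decomposes the answers into residue classes via strided slices answers[j::L] and sums per-class .count() of the single pattern value at that position, then filters the three candidate supervisor numbers by the maximum score.
import Mathlib
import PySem

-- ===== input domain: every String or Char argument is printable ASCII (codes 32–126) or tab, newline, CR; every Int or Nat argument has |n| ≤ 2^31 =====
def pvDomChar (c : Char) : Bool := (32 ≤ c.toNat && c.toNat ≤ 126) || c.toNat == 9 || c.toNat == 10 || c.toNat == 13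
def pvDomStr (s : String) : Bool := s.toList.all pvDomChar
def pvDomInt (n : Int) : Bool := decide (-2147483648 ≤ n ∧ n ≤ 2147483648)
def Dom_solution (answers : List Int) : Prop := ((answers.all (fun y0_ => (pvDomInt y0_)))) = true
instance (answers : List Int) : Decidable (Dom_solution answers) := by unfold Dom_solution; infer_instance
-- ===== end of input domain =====

-- B replaces A's single index loop (cycling the three patterns with i%L) by per-residue-class
-- counting: for each pattern it counts matches inside each strided slice answers[j::L] (idiomatic).


-- ===== PORT A =====
-- One pass over range(len(answers)) accumulating the 3-cell score list, then a loop over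
-- range(3) collecting the winners.  (All loop indices are in range, so pyGetD is exact,
-- and max(score) on the nonempty 3-element score list is (max? score).getD 0.)
def solution (answers : List Int) : List Int :=
  let answer1 : List Int := [1, 2, 3, 4, 5]
  let answer2 : List Int := [2, 1, 2, 3, 2, 4, 2, 5]
  let answer3 : List Int := [3, 3, 1, 1, 2, 2, 4, 4, 5, 5]
  let score : List Int :=
    (PySem.List.pyRange 0 (answers.length : Int) 1).foldl (fun score i =>
      let score := if PySem.List.pyGetD answers i 0 = PySem.List.pyGetD answer1 (PySem.Int.mod i 5) 0
                   then score.set 0 (score.getD 0 0 + 1) else score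
      let score := if PySem.List.pyGetD answers i 0 = PySem.List.pyGetD answer2 (PySem.Int.mod i 8) 0
                   then score.set 1 (score.getD 1 0 + 1) else score
      if PySem.List.pyGetD answers i 0 = PySem.List.pyGetD answer3 (PySem.Int.mod i 10) 0
      then score.set 2 (score.getD 2 0 + 1) else score)
      [0, 0, 0]
  (PySem.List.pyRange 0 3 1).foldl (fun winner i =>
    if PySem.List.pyGetD score i 0 = (PySem.List.max? score (fun x => x)).getD 0
    then winner ++ [1 + i] else winner) []

-- ===== PORT B =====
-- sum(answers[j::L].count(pat[j]) for j in range(L)): the strided slice answers[j::L] is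
-- PySem.List.slice? with step L; L > 0 for the three fixed patterns, so the slice never
-- raises and '.getD []' is exact.
def patScore (answers pat : List Int) : Int :=
  ((PySem.List.pyRange 0 (pat.length : Int) 1).map (fun j =>
    (((PySem.List.slice? answers (some j) none (pat.length : Int)).getD []).count
      (PySem.List.pyGetD pat j 0) : Int))).sum

def solution_alt (answers : List Int) : List Int :=
  let patterns : List (List Int) :=
    [[1, 2, 3, 4, 5], [2, 1, 2, 3, 2, 4, 2, 5], [3, 3, 1, 1, 2, 2, 4, 4, 5, 5]]
  let scores : List Int := patterns.foldl (fun acc pat => acc ++ [patScore answers pat]) []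
  let best : Int := (PySem.List.max? scores (fun x => x)).getD 0
  ([1, 2, 3] : List Int).filter (fun k => decide (PySem.List.pyGetD scores (k - 1) 0 = best))

-- ===== PRECONDITION & SPEC =====
def Spec_solution (answers : List Int) (out : List Int) : Prop := out = solution_alt answers
instance (answers : List Int) (out : List Int) : Decidable (Spec_solution answers out) := by unfold Spec_solution; infer_instance

-- ===== CLAIM (what is proved, stated in full; the proofs are below) =====
def Claim_equal_solution : Prop := ∀ (answers : List Int), Dom_solution answers → Spec_solution answers (solution answers)

-- ===== LEMMAS AND PROOFS =====

-- The common sequential counter both per-pattern scores reduce to: walk the answers once,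
-- rotating the pattern by one step per answer.
def seqCnt : List Int → List Int → Int
  | [], _ => 0
  | a :: r, pat => (if a = pat.getD 0 0 then 1 else 0) + seqCnt r (pat.rotate 1)

-- every L-th element, starting at the head (what the strided slice ys[0::L] keeps)
def takeEvery (L : Nat) : List Int → List Int
  | [] => []
  | a :: r => a :: takeEvery L (r.drop (L - 1))
termination_by ys => ys.length
decreasing_by simp

-- A's combined fold over any index list, started at [x,y,z], is the three individual sums.
lemma tripleFold (c1 c2 c3 : Int → Prop)
    [DecidablePred c1] [DecidablePred c2] [DecidablePred c3] (L : List Int) :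
    ∀ x y z : Int,
    L.foldl (fun score i =>
      let score := if c1 i then score.set 0 (score.getD 0 0 + 1) else score
      let score := if c2 i then score.set 1 (score.getD 1 0 + 1) else score
      if c3 i then score.set 2 (score.getD 2 0 + 1) else score) [x, y, z]
    = [x + (L.map fun i => if c1 i then (1 : Int) else 0).sum,
       y + (L.map fun i => if c2 i then (1 : Int) else 0).sum,
       z + (L.map fun i => if c3 i then (1 : Int) else 0).sum] := by
  induction L with
  | nil => simp
  | cons a L ih =>
    intro x y z
    have hstep : (let score := if c1 a then ([x, y, z] : List Int).set 0 (([x, y, z] : List Int).getD 0 0 + 1) else [x, y, z]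
      let score := if c2 a then score.set 1 (score.getD 1 0 + 1) else score
      if c3 a then score.set 2 (score.getD 2 0 + 1) else score)
        = [x + (if c1 a then (1 : Int) else 0),
           y + (if c2 a then (1 : Int) else 0),
           z + (if c3 a then (1 : Int) else 0)] := by
      by_cases h1 : c1 a <;> by_cases h2 : c2 a <;> by_cases h3 : c3 a <;>
        simp [h1, h2, h3]
    rw [List.foldl_cons, hstep, ih, List.map_cons, List.map_cons, List.map_cons,
      List.sum_cons, List.sum_cons, List.sum_cons]
    simp only [List.cons.injEq, and_true]
    refine ⟨by ring, by ring, by ring⟩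

-- getD of a once-rotated pattern
lemma rot_getD (pat : List Int) (h : pat ≠ []) (j : Nat) (hj : j < pat.length) :
    (pat.rotate 1).getD j 0 = pat.getD ((j+1) % pat.length) 0 := by
  have hL : 0 < pat.length := List.length_pos_iff.mpr h
  have h1 : j < (pat.rotate 1).length := by simpa using hj
  have h2 : (j+1) % pat.length < pat.length := Nat.mod_lt _ hL
  rw [List.getD_eq_getElem _ _ h1, List.getD_eq_getElem _ _ h2, List.getElem_rotate]

-- A side: the indexed 0/1 sum over range(len xs) is the sequential counter.
lemma natA_eq_seqCnt (xs : List Int) : ∀ pat : List Int, pat ≠ [] →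
    ((List.range xs.length).map (fun i =>
      if xs.getD i 0 = pat.getD (i % pat.length) 0 then (1:Int) else 0)).sum = seqCnt xs pat := by
  induction xs with
  | nil => intro pat _; simp [seqCnt]
  | cons a r ih =>
    intro pat hp
    have hL : 0 < pat.length := List.length_pos_iff.mpr hp
    rw [List.length_cons, List.range_succ_eq_map, List.map_cons, List.map_map, List.sum_cons]
    have hrot : pat.rotate 1 ≠ [] := by
      intro h; apply hp; simpa using congrArg List.length h
    have hbody : ((fun i =>
        if (a :: r).getD i 0 = pat.getD (i % pat.length) 0 then (1:Int) else 0) ∘ Nat.succ)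
        = (fun i => if r.getD i 0 = (pat.rotate 1).getD (i % (pat.rotate 1).length) 0 then (1:Int) else 0) := by
      funext i
      have e1 : (pat.rotate 1).getD (i % pat.length) 0 = pat.getD ((i % pat.length + 1) % pat.length) 0 :=
        rot_getD pat hp _ (Nat.mod_lt _ hL)
      have hm : (i % pat.length + 1) % pat.length = (i + 1) % pat.length := by
        conv_rhs => rw [Nat.add_mod]
        rw [Nat.add_mod (i % pat.length) 1, Nat.mod_mod_of_dvd i (dvd_refl _)]
      simp only [Function.comp_apply, Nat.succ_eq_add_one, List.getD_cons_succ,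
        List.length_rotate, e1, hm]
    rw [hbody, ih _ hrot]
    simp [seqCnt]

-- A side, PySem form (pyRange / pyGetD / Int.mod) reduced to the sequential counter
lemma pyA_bridge (xs pat : List Int) (hp : pat ≠ []) :
    ((PySem.List.pyRange 0 (xs.length : Int) 1).map (fun i =>
      if PySem.List.pyGetD xs i 0 = PySem.List.pyGetD pat (PySem.Int.mod i (pat.length : Int)) 0
      then (1:Int) else 0)).sum = seqCnt xs pat := by
  rw [PySem.List.pyRange_one, List.map_map]
  rw [← natA_eq_seqCnt xs pat hp]
  congr 1
  simp only [sub_zero, Int.toNat_natCast]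
  apply List.map_congr_left
  intro k hk
  simp only [Function.comp_apply, zero_add, PySem.Int.mod_natCast, PySem.List.pyGetD_natCast]

-- pyA_bridge with the pattern length given as the numeral A's source writes
lemma pyA_bridge' (xs pat : List Int) (L : Int) (hp : pat ≠ []) (hLen : (pat.length : Int) = L) :
    ((PySem.List.pyRange 0 (xs.length : Int) 1).map (fun i =>
      if PySem.List.pyGetD xs i 0 = PySem.List.pyGetD pat (PySem.Int.mod i L) 0
      then (1:Int) else 0)).sum = seqCnt xs pat := by
  subst hLen
  exact pyA_bridge xs pat hp

-- takeEvery as an indexed map (the closed form slice? computes)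
lemma takeEvery_eq_map_aux (L : Nat) (hL : 0 < L) :
    ∀ (n : Nat) (ys : List Int), ys.length ≤ n →
    takeEvery L ys = (List.range ((ys.length + L - 1) / L)).map (fun k => ys.getD (L * k) 0) := by
  intro n
  induction n with
  | zero =>
    intro ys h
    have : ys = [] := List.length_eq_zero_iff.mp (Nat.le_zero.mp h)
    subst this
    simp [takeEvery]; omega
  | succ n ih =>
    intro ys h
    match ys with
    | [] => simp [takeEvery]; omega
    | a :: r =>
      rw [takeEvery]
      have hdl : (r.drop (L-1)).length = r.length - (L-1) := by simp
      rw [ih (r.drop (L-1)) (by simp at h ⊢; omega)]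
      have hcount : ((a :: r).length + L - 1) / L = ((r.drop (L-1)).length + L - 1) / L + 1 := by
        rw [hdl, List.length_cons, show r.length + 1 + L - 1 = r.length + L from by omega,
          Nat.add_div_right _ hL]
        congr 1
        rcases Nat.lt_or_ge r.length (L-1) with hlt | hge
        · rw [show r.length - (L-1) = 0 from by omega,
            Nat.div_eq_of_lt (by omega), Nat.div_eq_of_lt (by omega)]
        · rw [show r.length - (L-1) + L - 1 = r.length from by omega]
      rw [hcount, List.range_succ_eq_map, List.map_cons, List.map_map]
      congr 1
      apply List.map_congr_left
      intro k hk
      simp only [Function.comp_apply]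
      rw [Nat.mul_succ, show L * k + L = (L - 1 + L * k) + 1 from by omega]
      rw [List.getD_cons_succ]
      rw [List.getD_eq_getElem?_getD, List.getD_eq_getElem?_getD, List.getElem?_drop]

-- the strided slice xs[j::L] (j ≥ 0, L > 0) is takeEvery L of the j-th tail
lemma slice?_eq_takeEvery (xs : List Int) (j L : Nat) (hL : 0 < L) :
    PySem.List.slice? xs (some (j : Int)) none (L : Int) = some (takeEvery L (xs.drop j)) := by
  have hLne : (L : Int) ≠ 0 := by exact_mod_cast hL.ne'
  have h1 : ¬((L:Int) < 0) := by omega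
  have h2 : ¬((j:Int) < 0) := by omega
  rcases Nat.lt_or_ge j xs.length with hj | hj
  case inr =>
    rw [List.drop_eq_nil_of_le hj]
    simp only [PySem.List.slice?, PySem.List.sliceIndices, if_neg hLne, if_neg h1, if_neg h2]
    norm_num [show ¬ j < xs.length from by omega, takeEvery, hL]
  case inl =>
    have hmin : min ((j:Int)) ((xs.length : Int)) = (j : Int) := by omega
    simp only [PySem.List.slice?, PySem.List.sliceIndices, if_neg hLne, if_neg h1, if_neg h2, hmin]
    have hlt : ((j:Int)) < (xs.length : Int) := by omega
    rw [if_pos hlt]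
    have hcast : (xs.length : Int) - (j:Int) + (L:Int) - 1 = ((xs.length - j + L - 1 : Nat) : Int) := by omega
    have hcount : (((xs.length : Int) - ↑j + ↑L - 1) / ↑L).toNat = (xs.length - j + L - 1) / L := by
      rw [hcast]; rfl
    rw [hcount]
    have hpos : (0:Int) < (L:Int) := by omega
    rw [if_pos hpos]
    have hbound : ∀ k, k < (xs.length - j + L - 1) / L → j + L * k < xs.length := by
      intro k hk
      have h3 : L * (k + 1) ≤ L * ((xs.length - j + L - 1) / L) := Nat.mul_le_mul_left L hk
      have h4 : L * ((xs.length - j + L - 1) / L) ≤ xs.length - j + L - 1 := Nat.mul_div_le _ L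
      rw [Nat.mul_succ] at h3
      omega
    rw [(List.filterMap_eq_map_iff_forall_eq_some
      (f := fun x : Nat => xs[(((j:Int)) + ((L:Int)) * ((x:Int))).toNat]?)
      (g := fun k => xs.getD (j + L * k) 0)
      (l := List.range ((xs.length - j + L - 1) / L))).mpr ?_]
    · rw [takeEvery_eq_map_aux L hL (xs.drop j).length _ le_rfl]
      have hdl : (xs.drop j).length = xs.length - j := by simp
      rw [hdl]
      congr 1
      apply List.map_congr_left
      intro k hk
      rw [List.getD_eq_getElem?_getD, List.getD_eq_getElem?_getD, List.getElem?_drop]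
    · intro k hk
      rw [List.mem_range] at hk
      have hb := hbound k hk
      have htn : (((j:Int)) + ↑L * ↑k).toNat = j + L * k := by
        have : ((j:Int)) + ↑L * ↑k = ((j + L * k : Nat) : Int) := by push_cast; ring
        rw [this, Int.toNat_natCast]
      rw [htn, List.getElem?_eq_getElem hb, List.getD_eq_getElem?_getD,
        List.getElem?_eq_getElem hb]
      rfl

-- B side: summing the per-residue-class counts is the same sequential counter.
lemma natB_eq_seqCnt (xs : List Int) : ∀ pat : List Int, pat ≠ [] →
    ((List.range pat.length).map (fun j =>
      ((takeEvery pat.length (xs.drop j)).count (pat.getD j 0) : Int))).sum = seqCnt xs pat := by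
  induction xs with
  | nil =>
    intro pat _
    simp [seqCnt, takeEvery]
  | cons a r ih =>
    intro pat hp
    have hL : 0 < pat.length := List.length_pos_iff.mpr hp
    have hrot : pat.rotate 1 ≠ [] := by
      intro h; apply hp; simpa using congrArg List.length h
    have hrotlen : (pat.rotate 1).length = pat.length := List.length_rotate pat 1
    rw [seqCnt, ← ih (pat.rotate 1) hrot, hrotlen]
    conv_rhs => rw [show pat.length = (pat.length - 1) + 1 from by omega, List.range_succ,
      List.map_append, List.sum_append]
    conv_lhs => rw [show pat.length = (pat.length - 1) + 1 from by omega,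
      List.range_succ_eq_map, List.map_cons, List.sum_cons, List.map_map]
    have hrj : ∀ j, j < pat.length - 1 →
        (pat.rotate 1).getD j 0 = pat.getD (j+1) 0 := by
      intro j hj
      rw [rot_getD pat hp j (by omega), Nat.mod_eq_of_lt (by omega)]
    have hrlast : (pat.rotate 1).getD (pat.length - 1) 0 = pat.getD 0 0 := by
      rw [rot_getD pat hp _ (by omega), show pat.length - 1 + 1 = pat.length from by omega,
        Nat.mod_self]
    rw [List.drop_zero, takeEvery]
    rw [show pat.length - 1 + 1 = pat.length from by omega]
    have hmap2 : (List.range (pat.length - 1)).map ((fun j =>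
        ((takeEvery pat.length ((a :: r).drop j)).count (pat.getD j 0) : Int)) ∘ Nat.succ)
        = (List.range (pat.length - 1)).map (fun j =>
        ((takeEvery pat.length (r.drop j)).count (pat.getD (j+1) 0) : Int)) := by
      apply List.map_congr_left
      intro j _
      simp only [Function.comp_apply, Nat.succ_eq_add_one, List.drop_succ_cons]
    have hmapeq : (List.range (pat.length - 1)).map (fun j =>
        ((takeEvery pat.length (r.drop j)).count ((pat.rotate 1).getD j 0) : Int))
        = (List.range (pat.length - 1)).map (fun j =>
        ((takeEvery pat.length (r.drop j)).count (pat.getD (j+1) 0) : Int)) := by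
      apply List.map_congr_left
      intro j hj
      rw [hrj j (List.mem_range.mp hj)]
    rw [hmap2, hmapeq, List.map_cons, List.map_nil, List.count_cons]
    simp only [List.sum_cons, List.sum_nil, hrlast, beq_iff_eq]
    by_cases hcase : a = pat.getD 0 0
    · simp only [hcase, if_true]
      push_cast
      ring
    · simp only [if_neg hcase]
      push_cast
      ring

-- B's per-pattern score, PySem form, reduced to the sequential counter
lemma patScore_eq (answers pat : List Int) (hp : pat ≠ []) :
    patScore answers pat = seqCnt answers pat := by
  have hL : 0 < pat.length := List.length_pos_iff.mpr hp
  unfold patScore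
  rw [← natB_eq_seqCnt answers pat hp, PySem.List.pyRange_one, List.map_map]
  congr 1
  simp only [sub_zero, Int.toNat_natCast]
  apply List.map_congr_left
  intro j hj
  simp only [Function.comp_apply, zero_add, PySem.List.pyGetD_natCast]
  rw [slice?_eq_takeEvery answers j pat.length hL]
  rfl

-- winner selection: A's range(3) loop equals B's filter over (1, 2, 3)
lemma winnersFold (s1 s2 s3 m : Int) :
    (PySem.List.pyRange 0 3 1).foldl (fun winner i =>
      if PySem.List.pyGetD ([s1, s2, s3] : List Int) i 0 = m
      then winner ++ [1 + i] else winner) []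
    = ([1, 2, 3] : List Int).filter (fun k =>
        decide (PySem.List.pyGetD ([s1, s2, s3] : List Int) (k - 1) 0 = m)) := by
  have hr3 : PySem.List.pyRange 0 3 1 = [0, 1, 2] := by decide
  rw [hr3]
  have e0 : PySem.List.pyGetD ([s1, s2, s3] : List Int) 0 0 = s1 := rfl
  have e1 : PySem.List.pyGetD ([s1, s2, s3] : List Int) 1 0 = s2 := rfl
  have e2 : PySem.List.pyGetD ([s1, s2, s3] : List Int) 2 0 = s3 := rfl
  simp only [List.foldl_cons, List.foldl_nil, List.filter]
  norm_num [e0, e1, e2]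
  by_cases h1 : s1 = m <;> by_cases h2 : s2 = m <;> by_cases h3 : s3 = m <;>
    simp [h1, h2, h3]

-- ===== VERDICT (by name: the statement is the Claim_ definition above) =====
theorem solution_spec : Claim_equal_solution := by
  intro answers _
  unfold Spec_solution solution solution_alt
  simp only []
  rw [tripleFold
      (fun i => PySem.List.pyGetD answers i 0 = PySem.List.pyGetD [1, 2, 3, 4, 5] (PySem.Int.mod i 5) 0)
      (fun i => PySem.List.pyGetD answers i 0 = PySem.List.pyGetD [2, 1, 2, 3, 2, 4, 2, 5] (PySem.Int.mod i 8) 0)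
      (fun i => PySem.List.pyGetD answers i 0 = PySem.List.pyGetD [3, 3, 1, 1, 2, 2, 4, 4, 5, 5] (PySem.Int.mod i 10) 0)]
  rw [pyA_bridge' answers [1, 2, 3, 4, 5] 5 (by simp) (by norm_num),
    pyA_bridge' answers [2, 1, 2, 3, 2, 4, 2, 5] 8 (by simp) (by norm_num),
    pyA_bridge' answers [3, 3, 1, 1, 2, 2, 4, 4, 5, 5] 10 (by simp) (by norm_num)]
  rw [show ([[1, 2, 3, 4, 5], [2, 1, 2, 3, 2, 4, 2, 5], [3, 3, 1, 1, 2, 2, 4, 4, 5, 5]] : List (List Int)).foldl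
      (fun acc pat => acc ++ [patScore answers pat]) []
    = [patScore answers [1, 2, 3, 4, 5], patScore answers [2, 1, 2, 3, 2, 4, 2, 5],
       patScore answers [3, 3, 1, 1, 2, 2, 4, 4, 5, 5]] from rfl]
  rw [patScore_eq answers [1, 2, 3, 4, 5] (by simp),
    patScore_eq answers [2, 1, 2, 3, 2, 4, 2, 5] (by simp),
    patScore_eq answers [3, 3, 1, 1, 2, 2, 4, 4, 5, 5] (by simp)]
  simp only [zero_add]
  exact winnersFold _ _ _ _
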